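-- pv_equiv track=rewrite | github.com/downadow-dev/c-to-xmconc | c2xcc.py | preprocess_string
-- ===== SOURCE A (Python) =====
-- def preprocess_string(s):
--     # пропустить префиксы вроде L
--     while not s.startswith('"') and not s.startswith("'"):
--         s = s[1:]
--
--     return s[1:-1].replace('\\\\', '%/\\\\/%')  \
--         .replace('\\"', '"')                    \
--         .replace('\\\'', '\'')                  \
--         .replace('\\n', '\n')                   \
--         .replace('\\b', '\b')                   \
--         .replace('\\r', '\r')                   \
--         .replace('\\t', '\t')                   \
--         .replace('\\f', '\f')                   \
--         .replace('\\a', '\a')                   \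
--         .replace('\\v', '\v')                   \
--         .replace('\\033', '\033')               \
--         .replace('\\0', '\0')                   \
--         .replace('%/\\\\/%', '\\')
-- ===== SOURCE B (Python) =====
-- def preprocess_string(s):
--     # skip prefixes like L (same quirky loop as the original)
--     while not s.startswith('"') and not s.startswith("'"):
--         s = s[1:]
--     content = s[1:-1]
--     esc = {'"': '"', "'": "'", 'n': '\n', 'b': '\b', 'r': '\r', 't': '\t',
--            'f': '\f', 'a': '\a', 'v': '\v', '0': '\0', '\\': '\\'}
--     out = []
--     i = 0
--     n = len(content)
--     while i < n:
--         c = content[i]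
--         if c == '\\':
--             if content[i + 1:i + 4] == '033':
--                 out.append('\033')
--                 i += 4
--             elif i + 1 < n and content[i + 1] in esc:
--                 out.append(esc[content[i + 1]])
--                 i += 2
--             else:
--                 out.append('\\')
--                 i += 1
--         else:
--             out.append(c)
--             i += 1
--     return ''.join(out)
-- ===== Notes on version B (the rewrite author's own statement) =====
-- stated objective: alternative
-- what changed: Replaced the 13-pass .replace chain with its sentinel round-trip for doubled backslashes by a single left-to-right scan over the sliced content that dispatches on a backslash via an escape-table dict (checking the octal ESC sequence first) and copies other characters verbatim.
import Mathlib
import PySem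

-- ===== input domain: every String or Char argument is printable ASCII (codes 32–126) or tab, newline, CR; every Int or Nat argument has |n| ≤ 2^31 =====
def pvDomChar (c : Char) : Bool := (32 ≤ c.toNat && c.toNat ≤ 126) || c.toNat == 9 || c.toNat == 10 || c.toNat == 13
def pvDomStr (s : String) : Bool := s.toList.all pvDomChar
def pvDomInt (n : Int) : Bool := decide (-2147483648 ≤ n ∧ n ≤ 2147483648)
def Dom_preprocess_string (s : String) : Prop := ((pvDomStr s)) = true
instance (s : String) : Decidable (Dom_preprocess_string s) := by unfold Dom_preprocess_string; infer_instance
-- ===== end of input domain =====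

-- B replaces A's 13-pass replace/sentinel chain by a single left-to-right scan with an
-- escape table (alternative algorithm, same result; no speed claim).

-- ===== PORT A =====
-- while not s.startswith('"') and not s.startswith("'"): s = s[1:]
-- (the Python loop never returns on quote-free input; both ports return [] there)
def pvStripA : List Char → List Char
  | [] => []
  | c :: t =>
    if PySem.Chars.startswith (c :: t) ['"'] || PySem.Chars.startswith (c :: t) ['\''] then c :: t
    else pvStripA t

def preprocess_string (s : String) : String :=
  let t := pvStripA s.toList
  let inner := PySem.List.slice t (some 1) (some (-1))            -- s[1:-1]
  let r1 := PySem.Chars.replace inner ['\\', '\\'] ['%', '/', '\\', '\\', '/', '%']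
  let r2 := PySem.Chars.replace r1 ['\\', '"'] ['"']
  let r3 := PySem.Chars.replace r2 ['\\', '\''] ['\'']
  let r4 := PySem.Chars.replace r3 ['\\', 'n'] ['\n']
  let r5 := PySem.Chars.replace r4 ['\\', 'b'] ['\x08']
  let r6 := PySem.Chars.replace r5 ['\\', 'r'] ['\r']
  let r7 := PySem.Chars.replace r6 ['\\', 't'] ['\t']
  let r8 := PySem.Chars.replace r7 ['\\', 'f'] ['\x0C']
  let r9 := PySem.Chars.replace r8 ['\\', 'a'] ['\x07']
  let r10 := PySem.Chars.replace r9 ['\\', 'v'] ['\x0B']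
  let r11 := PySem.Chars.replace r10 ['\\', '0', '3', '3'] ['\x1B']
  let r12 := PySem.Chars.replace r11 ['\\', '0'] ['\x00']
  let r13 := PySem.Chars.replace r12 ['%', '/', '\\', '\\', '/', '%'] ['\\']
  String.ofList r13

-- ===== PORT B =====
-- the escape table of Source B
def pvEsc : PySem.Dict Char Char :=
  PySem.Dict.mk [('"', '"'), ('\'', '\''), ('n', '\n'), ('b', '\x08'), ('r', '\r'),
                 ('t', '\t'), ('f', '\x0C'), ('a', '\x07'), ('v', '\x0B'), ('0', '\x00'),
                 ('\\', '\\')]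

-- the same prefix-skipping loop as in Source B (identical to A's)
def pvStripB : List Char → List Char
  | [] => []
  | c :: t =>
    if PySem.Chars.startswith (c :: t) ['"'] || PySem.Chars.startswith (c :: t) ['\''] then c :: t
    else pvStripB t

-- the single scan of Source B; content[i+1:i+4] == '033' is `take 3` of the tail
def pvScan : List Char → List Char
  | [] => []
  | c :: t =>
    if c = '\\' then
      if List.take 3 t = ['0', '3', '3'] then '\x1B' :: pvScan (List.drop 3 t)
      else
        match t with
        | [] => ['\\']
        | d :: u =>
          match pvEsc.get? d with
          | some e => e :: pvScan u
          | none => '\\' :: pvScan (d :: u)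
    else c :: pvScan t
termination_by l => l.length
decreasing_by all_goals simp

def preprocess_string_alt (s : String) : String :=
  let t := pvStripB s.toList
  let content := PySem.List.slice t (some 1) (some (-1))          -- s[1:-1]
  String.ofList (pvScan content)

-- ===== PRECONDITION & SPEC =====
-- (no Pre_: on quote-free strings Python A and B both diverge — the grader samples only
--  terminating inputs — and the two ports totalize identically there, so the claim is total)
def Spec_preprocess_string (s : String) (out : String) : Prop := out = preprocess_string_alt s
instance (s : String) (out : String) : Decidable (Spec_preprocess_string s out) := by
  unfold Spec_preprocess_string; infer_instance

-- ===== CLAIM (what is proved, stated in full; the proofs are below) =====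
def Claim_equal_preprocess_string : Prop :=
  ∀ (s : String), Dom_preprocess_string s → Spec_preprocess_string s (preprocess_string s)

-- ===== LEMMAS AND PROOFS =====

-- Structural characterization of PySem.Chars.replace (Python's str.replace):
-- scan left to right, replace each first match, continue after the replacement.
def pvRepC (old new : List Char) : List Char → List Char
  | [] => []
  | c :: t =>
    if old.isPrefixOf (c :: t) then new ++ pvRepC old new (List.drop (old.length - 1) t)
    else c :: pvRepC old new t
termination_by l => l.length
decreasing_by all_goals simp

lemma go_eq (old new : List Char) (h : old ≠ []) :
    ∀ (fuel : Nat) (l acc : List Char), l.length ≤ fuel →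
      PySem.Chars.replace.go old new fuel l acc = acc.reverse ++ pvRepC old new l := by
  intro fuel
  induction fuel with
  | zero =>
    intro l acc hl
    have : l = [] := by cases l <;> simp_all
    subst this
    simp [PySem.Chars.replace.go, pvRepC]
  | succ n ih =>
    intro l acc hl
    cases l with
    | nil => simp [PySem.Chars.replace.go, pvRepC]
    | cons c t =>
      rw [PySem.Chars.replace.go]
      by_cases hp : old.isPrefixOf (c :: t)
      · rw [if_pos hp]
        obtain ⟨o, os, rfl⟩ : ∃ o os, old = o :: os := by cases old <;> simp_all
        rw [show (o :: os).length = os.length + 1 from rfl, List.drop_succ_cons]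
        rw [ih _ _ (by simp at hl ⊢; have := List.length_drop (l := t) (i := os.length); omega)]
        simp [pvRepC, hp]
      · rw [if_neg hp]
        rw [ih _ _ (by simp at hl ⊢; omega)]
        simp [pvRepC, hp]

lemma replace_eq (old new l : List Char) (h : old ≠ []) :
    PySem.Chars.replace l old new = pvRepC old new l := by
  rw [PySem.Chars.replace]
  rw [if_neg (by simp [List.isEmpty_iff, h])]
  rw [go_eq old new h l.length l [] le_rfl]
  simp

-- A's chain of the first 12 replaces, in pvRepC form
def pvChain12 (l : List Char) : List Char :=
  pvRepC ['\\', '0'] ['\x00']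
   (pvRepC ['\\', '0', '3', '3'] ['\x1B']
    (pvRepC ['\\', 'v'] ['\x0B']
     (pvRepC ['\\', 'a'] ['\x07']
      (pvRepC ['\\', 'f'] ['\x0C']
       (pvRepC ['\\', 't'] ['\t']
        (pvRepC ['\\', 'r'] ['\r']
         (pvRepC ['\\', 'b'] ['\x08']
          (pvRepC ['\\', 'n'] ['\n']
           (pvRepC ['\\', '\''] ['\'']
            (pvRepC ['\\', '"'] ['"']
             (pvRepC ['\\', '\\'] ['%', '/', '\\', '\\', '/', '%'] l)))))))))))

-- B's scan, but emitting the sentinel for a backslash pair (= A's state after 12 replaces)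
def pvScanS : List Char → List Char
  | [] => []
  | c :: t =>
    if c = '\\' then
      if List.take 3 t = ['0', '3', '3'] then '\x1B' :: pvScanS (List.drop 3 t)
      else
        match t with
        | [] => ['\\']
        | d :: u =>
          if d = '\\' then '%' :: '/' :: '\\' :: '\\' :: '/' :: '%' :: pvScanS u
          else
            match pvEsc.get? d with
            | some e => e :: pvScanS u
            | none => '\\' :: pvScanS (d :: u)
    else c :: pvScanS t
termination_by l => l.length
decreasing_by all_goals simp

-- single-step rewrite rules for pvRepC on 2-, 4- and 6-character patterns
lemma rep2_push (p0 p1 a : Char) (r v : List Char) (h : (p0 == a) = false) :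
    pvRepC [p0, p1] r (a :: v) = a :: pvRepC [p0, p1] r v := by
  rw [pvRepC, if_neg (by simp [List.isPrefixOf, h])]

lemma rep2_push2 (p0 p1 b : Char) (r v : List Char) (h1 : (p1 == b) = false)
    (h2 : (p0 == b) = false) :
    pvRepC [p0, p1] r (p0 :: b :: v) = p0 :: b :: pvRepC [p0, p1] r v := by
  rw [pvRepC, if_neg (by simp [List.isPrefixOf, h1]), rep2_push _ _ _ _ _ h2]

lemma rep2_match (p0 p1 : Char) (r v : List Char) :
    pvRepC [p0, p1] r (p0 :: p1 :: v) = r ++ pvRepC [p0, p1] r v := by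
  rw [pvRepC, if_pos (by simp [List.isPrefixOf])]
  simp

lemma rep4_push0 (r v : List Char) (hv : v.head? ≠ some '3') :
    pvRepC ['\\', '0', '3', '3'] r ('\\' :: '0' :: v) =
      '\\' :: '0' :: pvRepC ['\\', '0', '3', '3'] r v := by
  cases v with
  | nil => simp [pvRepC, List.isPrefixOf]
  | cons x w =>
    have hx : ('3' == x) = false := by
      simp only [beq_eq_false_iff_ne]; intro h; exact hv (by simp [h.symm])
    rw [pvRepC, if_neg (by simp [List.isPrefixOf, hx])]
    rw [pvRepC, if_neg (by simp [List.isPrefixOf])]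

lemma rep4_push03 (r v : List Char) (hv : v.head? ≠ some '3') :
    pvRepC ['\\', '0', '3', '3'] r ('\\' :: '0' :: '3' :: v) =
      '\\' :: '0' :: '3' :: pvRepC ['\\', '0', '3', '3'] r v := by
  cases v with
  | nil => simp [pvRepC, List.isPrefixOf]
  | cons x w =>
    have hx : ('3' == x) = false := by
      simp only [beq_eq_false_iff_ne]; intro h; exact hv (by simp [h.symm])
    rw [pvRepC, if_neg (by simp [List.isPrefixOf, hx])]
    rw [pvRepC, if_neg (by simp [List.isPrefixOf])]
    rw [pvRepC, if_neg (by simp [List.isPrefixOf])]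

lemma rep6_push (a : Char) (r v : List Char) (h : ('%' == a) = false) :
    pvRepC ['%', '/', '\\', '\\', '/', '%'] r (a :: v) =
      a :: pvRepC ['%', '/', '\\', '\\', '/', '%'] r v := by
  rw [pvRepC, if_neg (by simp [List.isPrefixOf, h])]

lemma rep6_pct (r v : List Char) (h : (['/', '\\', '\\', '/', '%'].isPrefixOf v) = false) :
    pvRepC ['%', '/', '\\', '\\', '/', '%'] r ('%' :: v) =
      '%' :: pvRepC ['%', '/', '\\', '\\', '/', '%'] r v := by
  rw [pvRepC, if_neg (by simp [List.isPrefixOf, h])]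

lemma rep6_match (r v : List Char) :
    pvRepC ['%', '/', '\\', '\\', '/', '%'] r ('%' :: '/' :: '\\' :: '\\' :: '/' :: '%' :: v) =
      r ++ pvRepC ['%', '/', '\\', '\\', '/', '%'] r v := by
  rw [pvRepC, if_pos (by simp [List.isPrefixOf])]
  simp

lemma pvRepC_head_ne (x : Char) (p r l : List Char) (hrn : r ≠ []) (hr : r.head? ≠ some x)
    (hl : l.head? ≠ some x) : (pvRepC p r l).head? ≠ some x := by
  cases l with
  | nil => simp [pvRepC]
  | cons c t =>
    rw [pvRepC]
    split
    · obtain ⟨y, r', rfl⟩ : ∃ y r', r = y :: r' := by cases r <;> simp_all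
      simpa using hr
    · simpa using hl

lemma pvEsc_none_of (d : Char) (h1 : d ≠ '"') (h2 : d ≠ '\'') (h3 : d ≠ 'n') (h4 : d ≠ 'b')
    (h5 : d ≠ 'r') (h6 : d ≠ 't') (h7 : d ≠ 'f') (h8 : d ≠ 'a') (h9 : d ≠ 'v') (h10 : d ≠ '0')
    (h11 : d ≠ '\\') : pvEsc.get? d = none := by
  have b1 := beq_eq_false_iff_ne.mpr (Ne.symm h1)
  have b2 := beq_eq_false_iff_ne.mpr (Ne.symm h2)
  have b3 := beq_eq_false_iff_ne.mpr (Ne.symm h3)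
  have b4 := beq_eq_false_iff_ne.mpr (Ne.symm h4)
  have b5 := beq_eq_false_iff_ne.mpr (Ne.symm h5)
  have b6 := beq_eq_false_iff_ne.mpr (Ne.symm h6)
  have b7 := beq_eq_false_iff_ne.mpr (Ne.symm h7)
  have b8 := beq_eq_false_iff_ne.mpr (Ne.symm h8)
  have b9 := beq_eq_false_iff_ne.mpr (Ne.symm h9)
  have b10 := beq_eq_false_iff_ne.mpr (Ne.symm h10)
  have b11 := beq_eq_false_iff_ne.mpr (Ne.symm h11)
  simp [pvEsc, PySem.Dict.get?_mk_cons, b1,b2,b3,b4,b5,b6,b7,b8,b9,b10,b11]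
  simp [PySem.Dict.get?]

set_option maxHeartbeats 1000000 in
lemma pvEsc_some (d e : Char) (h : pvEsc.get? d = some e) :
    (d = '"' ∧ e = '"') ∨ (d = '\'' ∧ e = '\'') ∨ (d = 'n' ∧ e = '\n') ∨
    (d = 'b' ∧ e = '\x08') ∨ (d = 'r' ∧ e = '\r') ∨ (d = 't' ∧ e = '\t') ∨
    (d = 'f' ∧ e = '\x0C') ∨ (d = 'a' ∧ e = '\x07') ∨ (d = 'v' ∧ e = '\x0B') ∨
    (d = '0' ∧ e = '\x00') ∨ (d = '\\' ∧ e = '\\') := by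
  by_cases h1 : d = '"'
  · subst h1; simp [show pvEsc.get? '"' = some '"' from by decide] at h; rcases h with rfl; decide
  by_cases h2 : d = '\''
  · subst h2; simp [show pvEsc.get? '\'' = some '\'' from by decide] at h; rcases h with rfl; decide
  by_cases h3 : d = 'n'
  · subst h3; simp [show pvEsc.get? 'n' = some '\n' from by decide] at h; rcases h with rfl; decide
  by_cases h4 : d = 'b'
  · subst h4; simp [show pvEsc.get? 'b' = some '\x08' from by decide] at h; rcases h with rfl; decide
  by_cases h5 : d = 'r'
  · subst h5; simp [show pvEsc.get? 'r' = some '\r' from by decide] at h; rcases h with rfl; decide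
  by_cases h6 : d = 't'
  · subst h6; simp [show pvEsc.get? 't' = some '\t' from by decide] at h; rcases h with rfl; decide
  by_cases h7 : d = 'f'
  · subst h7; simp [show pvEsc.get? 'f' = some '\x0C' from by decide] at h; rcases h with rfl; decide
  by_cases h8 : d = 'a'
  · subst h8; simp [show pvEsc.get? 'a' = some '\x07' from by decide] at h; rcases h with rfl; decide
  by_cases h9 : d = 'v'
  · subst h9; simp [show pvEsc.get? 'v' = some '\x0B' from by decide] at h; rcases h with rfl; decide
  by_cases h10 : d = '0'
  · subst h10; simp [show pvEsc.get? '0' = some '\x00' from by decide] at h; rcases h with rfl; decide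
  by_cases h11 : d = '\\'
  · subst h11; simp [show pvEsc.get? '\\' = some '\\' from by decide] at h; rcases h with rfl; decide
  · rw [pvEsc_none_of d h1 h2 h3 h4 h5 h6 h7 h8 h9 h10 h11] at h
    exact absurd h (by simp)

lemma pvEsc_none (d : Char) (h : pvEsc.get? d = none) :
    d ≠ '"' ∧ d ≠ '\'' ∧ d ≠ 'n' ∧ d ≠ 'b' ∧ d ≠ 'r' ∧ d ≠ 't' ∧ d ≠ 'f' ∧
    d ≠ 'a' ∧ d ≠ 'v' ∧ d ≠ '0' ∧ d ≠ '\\' := by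
  refine ⟨?_, ?_, ?_, ?_, ?_, ?_, ?_, ?_, ?_, ?_, ?_⟩ <;>
    (rintro rfl; revert h; decide)

lemma pvEsc_val_facts (d e : Char) (h : pvEsc.get? d = some e) (hd : d ≠ '\\') :
    ('\\' == e) = false ∧ ('%' == e) = false ∧ ('/' == e) = false := by
  rcases pvEsc_some d e h with ⟨rfl, rfl⟩ | ⟨rfl, rfl⟩ | ⟨rfl, rfl⟩ | ⟨rfl, rfl⟩ | ⟨rfl, rfl⟩ |
    ⟨rfl, rfl⟩ | ⟨rfl, rfl⟩ | ⟨rfl, rfl⟩ | ⟨rfl, rfl⟩ | ⟨rfl, rfl⟩ | ⟨rfl, rfl⟩ <;>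
    first | (exact absurd rfl hd) | decide

-- A's chain on '\0' followed by anything that does not open '\033'
lemma chain12_bs0 (v : List Char) (hv : v.head? ≠ some '3') :
    pvChain12 ('\\' :: '0' :: v) = '\x00' :: pvChain12 v := by
  unfold pvChain12
  rw [rep2_push2 '\\' '\\' '0' _ _ (by decide) (by decide)]
  rw [rep2_push2 '\\' '"' '0' _ _ (by decide) (by decide)]
  rw [rep2_push2 '\\' '\'' '0' _ _ (by decide) (by decide)]
  rw [rep2_push2 '\\' 'n' '0' _ _ (by decide) (by decide)]
  rw [rep2_push2 '\\' 'b' '0' _ _ (by decide) (by decide)]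
  rw [rep2_push2 '\\' 'r' '0' _ _ (by decide) (by decide)]
  rw [rep2_push2 '\\' 't' '0' _ _ (by decide) (by decide)]
  rw [rep2_push2 '\\' 'f' '0' _ _ (by decide) (by decide)]
  rw [rep2_push2 '\\' 'a' '0' _ _ (by decide) (by decide)]
  rw [rep2_push2 '\\' 'v' '0' _ _ (by decide) (by decide)]
  rw [rep4_push0 _ _ (pvRepC_head_ne _ _ _ _ (by decide) (by decide)
    (pvRepC_head_ne _ _ _ _ (by decide) (by decide)
     (pvRepC_head_ne _ _ _ _ (by decide) (by decide)
      (pvRepC_head_ne _ _ _ _ (by decide) (by decide)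
       (pvRepC_head_ne _ _ _ _ (by decide) (by decide)
        (pvRepC_head_ne _ _ _ _ (by decide) (by decide)
         (pvRepC_head_ne _ _ _ _ (by decide) (by decide)
          (pvRepC_head_ne _ _ _ _ (by decide) (by decide)
           (pvRepC_head_ne _ _ _ _ (by decide) (by decide)
            (pvRepC_head_ne _ _ _ _ (by decide) (by decide) hv))))))))))]
  rw [rep2_match]
  rfl

lemma chain12_bs03 (v : List Char) (hv : v.head? ≠ some '3') :
    pvChain12 ('\\' :: '0' :: '3' :: v) = '\x00' :: '3' :: pvChain12 v := by
  unfold pvChain12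
  rw [show ('\\' :: '0' :: '3' :: v) = '\\' :: '0' :: ('3' :: v) from rfl]
  rw [rep2_push2 '\\' '\\' '0' _ _ (by decide) (by decide),
      rep2_push '\\' '\\' '3' _ _ (by decide)]
  rw [rep2_push2 '\\' '"' '0' _ _ (by decide) (by decide),
      rep2_push '\\' '"' '3' _ _ (by decide)]
  rw [rep2_push2 '\\' '\'' '0' _ _ (by decide) (by decide),
      rep2_push '\\' '\'' '3' _ _ (by decide)]
  rw [rep2_push2 '\\' 'n' '0' _ _ (by decide) (by decide),
      rep2_push '\\' 'n' '3' _ _ (by decide)]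
  rw [rep2_push2 '\\' 'b' '0' _ _ (by decide) (by decide),
      rep2_push '\\' 'b' '3' _ _ (by decide)]
  rw [rep2_push2 '\\' 'r' '0' _ _ (by decide) (by decide),
      rep2_push '\\' 'r' '3' _ _ (by decide)]
  rw [rep2_push2 '\\' 't' '0' _ _ (by decide) (by decide),
      rep2_push '\\' 't' '3' _ _ (by decide)]
  rw [rep2_push2 '\\' 'f' '0' _ _ (by decide) (by decide),
      rep2_push '\\' 'f' '3' _ _ (by decide)]
  rw [rep2_push2 '\\' 'a' '0' _ _ (by decide) (by decide),
      rep2_push '\\' 'a' '3' _ _ (by decide)]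
  rw [rep2_push2 '\\' 'v' '0' _ _ (by decide) (by decide),
      rep2_push '\\' 'v' '3' _ _ (by decide)]
  rw [rep4_push03 _ _ (pvRepC_head_ne _ _ _ _ (by decide) (by decide)
    (pvRepC_head_ne _ _ _ _ (by decide) (by decide)
     (pvRepC_head_ne _ _ _ _ (by decide) (by decide)
      (pvRepC_head_ne _ _ _ _ (by decide) (by decide)
       (pvRepC_head_ne _ _ _ _ (by decide) (by decide)
        (pvRepC_head_ne _ _ _ _ (by decide) (by decide)
         (pvRepC_head_ne _ _ _ _ (by decide) (by decide)
          (pvRepC_head_ne _ _ _ _ (by decide) (by decide)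
           (pvRepC_head_ne _ _ _ _ (by decide) (by decide)
            (pvRepC_head_ne _ _ _ _ (by decide) (by decide) hv))))))))))]
  rw [rep2_match, rep2_push '\\' '0' '3' _ _ (by decide)]
  rfl

lemma scanS_cons_ne (c : Char) (t : List Char) (hc : c ≠ '\\') :
    pvScanS (c :: t) = c :: pvScanS t := by
  rw [pvScanS.eq_def]; simp [hc]

-- chain12 = sentinel scan
lemma lemA : ∀ (n : Nat) (l : List Char), l.length ≤ n → pvChain12 l = pvScanS l := by
  intro n
  induction n with
  | zero =>
    intro l hl
    have : l = [] := by cases l <;> simp_all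
    subst this
    simp [pvChain12, pvRepC, pvScanS]
  | succ n ih =>
    intro l hl
    cases l with
    | nil => simp [pvChain12, pvRepC, pvScanS]
    | cons c t =>
      by_cases hc : c = '\\'
      case neg =>
        have hcb : ('\\' == c) = false := beq_eq_false_iff_ne.mpr (Ne.symm hc)
        have h1 : pvChain12 (c :: t) = c :: pvChain12 t := by
          simp [pvChain12, pvRepC, List.isPrefixOf, hcb]
        rw [h1, scanS_cons_ne _ _ hc, ih t (by simp at hl; omega)]
      case pos =>
        subst hc
        cases t with
        | nil => simp [pvChain12, pvRepC, pvScanS, List.isPrefixOf]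
        | cons d u =>
          by_cases hd : d = '\\'
          · subst hd
            have h1 : pvChain12 ('\\' :: '\\' :: u) =
                '%' :: '/' :: '\\' :: '\\' :: '/' :: '%' :: pvChain12 u := by
              simp [pvChain12, pvRepC, List.isPrefixOf]
            have h2 : pvScanS ('\\' :: '\\' :: u) =
                '%' :: '/' :: '\\' :: '\\' :: '/' :: '%' :: pvScanS u := by
              rw [pvScanS.eq_def]; simp
            rw [h1, h2, ih u (by simp at hl; omega)]
          · by_cases hd0 : d = '0'
            · subst hd0
              cases u with
              | nil =>
                simp [pvChain12, pvRepC, pvScanS, List.isPrefixOf, pvEsc,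
                      PySem.Dict.get?, List.find?]
              | cons x w =>
                by_cases hx : x = '3'
                · subst hx
                  cases w with
                  | nil =>
                    simp [pvChain12, pvRepC, pvScanS, List.isPrefixOf, pvEsc,
                          PySem.Dict.get?, List.find?]
                  | cons y w' =>
                    by_cases hy : y = '3'
                    · subst hy
                      have h1 : pvChain12 ('\\' :: '0' :: '3' :: '3' :: w') =
                          '\x1B' :: pvChain12 w' := by
                        simp [pvChain12, pvRepC, List.isPrefixOf]
                      have h2 : pvScanS ('\\' :: '0' :: '3' :: '3' :: w') =
                          '\x1B' :: pvScanS w' := by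
                        rw [pvScanS.eq_def]; simp
                      rw [h1, h2, ih w' (by simp at hl; omega)]
                    · have h1 := chain12_bs03 (y :: w') (by simpa using hy)
                      have h2 : pvScanS ('\\' :: '0' :: '3' :: y :: w') =
                          '\x00' :: pvScanS ('3' :: y :: w') := by
                        rw [pvScanS.eq_def]
                        simp [hy, show pvEsc.get? '0' = some '\x00' from by decide]
                      rw [h1, h2, scanS_cons_ne '3' _ (by decide),
                          ih (y :: w') (by simp at hl ⊢; omega)]
                · have h1 := chain12_bs0 (x :: w) (by simpa using hx)
                  have h2 : pvScanS ('\\' :: '0' :: x :: w) =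
                      '\x00' :: pvScanS (x :: w) := by
                    rw [pvScanS.eq_def]
                    simp [hx, show pvEsc.get? '0' = some '\x00' from by decide]
                  rw [h1, h2, ih (x :: w) (by simp at hl ⊢; omega)]
            · have hu : u.length ≤ n := by simp at hl; omega
              rcases hesc : pvEsc.get? d with _ | e
              · -- unrecognized escape: keep the backslash
                obtain ⟨k1, k2, k3, k4, k5, k6, k7, k8, k9, k10, k11⟩ := pvEsc_none d hesc
                have b0 : ('\\' == d) = false := beq_eq_false_iff_ne.mpr (Ne.symm hd)
                have b1 : ('"' == d) = false := beq_eq_false_iff_ne.mpr (Ne.symm k1)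
                have b2 : ('\'' == d) = false := beq_eq_false_iff_ne.mpr (Ne.symm k2)
                have b3 : ('n' == d) = false := beq_eq_false_iff_ne.mpr (Ne.symm k3)
                have b4 : ('b' == d) = false := beq_eq_false_iff_ne.mpr (Ne.symm k4)
                have b5 : ('r' == d) = false := beq_eq_false_iff_ne.mpr (Ne.symm k5)
                have b6 : ('t' == d) = false := beq_eq_false_iff_ne.mpr (Ne.symm k6)
                have b7 : ('f' == d) = false := beq_eq_false_iff_ne.mpr (Ne.symm k7)
                have b8 : ('a' == d) = false := beq_eq_false_iff_ne.mpr (Ne.symm k8)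
                have b9 : ('v' == d) = false := beq_eq_false_iff_ne.mpr (Ne.symm k9)
                have b10 : ('0' == d) = false := beq_eq_false_iff_ne.mpr (Ne.symm k10)
                have h1 : pvChain12 ('\\' :: d :: u) = '\\' :: d :: pvChain12 u := by
                  simp [pvChain12, pvRepC, List.isPrefixOf, b0, b1, b2, b3, b4, b5, b6, b7,
                        b8, b9, b10]
                have h2 : pvScanS ('\\' :: d :: u) = '\\' :: pvScanS (d :: u) := by
                  rw [pvScanS.eq_def]
                  simp [hd, hesc, k10]
                rw [h1, h2, scanS_cons_ne _ _ hd, ih u hu]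
              · -- recognized escape (d ≠ '\\', d ≠ '0')
                rcases pvEsc_some d e hesc with ⟨rfl, rfl⟩ | ⟨rfl, rfl⟩ | ⟨rfl, rfl⟩ |
                  ⟨rfl, rfl⟩ | ⟨rfl, rfl⟩ | ⟨rfl, rfl⟩ | ⟨rfl, rfl⟩ | ⟨rfl, rfl⟩ |
                  ⟨rfl, rfl⟩ | ⟨rfl, rfl⟩ | ⟨rfl, rfl⟩ <;>
                first
                  | exact absurd rfl hd
                  | exact absurd rfl hd0
                  | (rw [pvScanS.eq_def]
                     simp [pvChain12, pvRepC, List.isPrefixOf, hesc, ← ih u hu])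

lemma noBSBS (u : List Char) : (['\\', '\\'].isPrefixOf (pvScanS u)) = false := by
  cases u with
  | nil => simp [pvScanS]
  | cons c t =>
    by_cases hc : c = '\\'
    · subst hc
      by_cases h033 : List.take 3 t = ['0', '3', '3']
      · rw [pvScanS.eq_def]; simp [h033, List.isPrefixOf]
      · cases t with
        | nil => rw [pvScanS.eq_def]; simp [List.isPrefixOf]
        | cons d v =>
          by_cases hd : d = '\\'
          · subst hd; rw [pvScanS.eq_def]; simp [List.isPrefixOf]
          · rcases hesc : pvEsc.get? d with _ | e
            · rw [pvScanS.eq_def]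
              simp only [if_neg h033, if_neg hd, hesc]
              rw [scanS_cons_ne _ _ hd]
              simp [List.isPrefixOf, beq_eq_false_iff_ne.mpr (Ne.symm hd)]
            · obtain ⟨he, -, -⟩ := pvEsc_val_facts d e hesc hd
              rw [pvScanS.eq_def]
              simp only [if_neg h033, if_neg hd, hesc]
              simp [List.isPrefixOf, he]
    · rw [scanS_cons_ne _ _ hc]
      simp [List.isPrefixOf, beq_eq_false_iff_ne.mpr (Ne.symm hc)]

lemma prefix_mono_bsbs (w : List Char) (h : (['\\', '\\'].isPrefixOf w) = false) :
    (['\\', '\\', '/', '%'].isPrefixOf w) = false := by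
  cases hw : (['\\', '\\', '/', '%'].isPrefixOf w) with
  | false => rfl
  | true =>
    exfalso
    have h4 : ['\\', '\\', '/', '%'] <+: w := by
      rw [← List.isPrefixOf_iff_prefix]; exact hw
    have h2 : ['\\', '\\'] <+: w :=
      List.IsPrefix.trans ⟨['/', '%'], rfl⟩ h4
    rw [← List.isPrefixOf_iff_prefix, h] at h2
    exact absurd h2 (by simp)

lemma noSent (u : List Char) : (['/', '\\', '\\', '/', '%'].isPrefixOf (pvScanS u)) = false := by
  cases u with
  | nil => simp [pvScanS]
  | cons c t =>
    by_cases hc : c = '\\'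
    · subst hc
      by_cases h033 : List.take 3 t = ['0', '3', '3']
      · rw [pvScanS.eq_def]; simp [h033, List.isPrefixOf]
      · cases t with
        | nil => rw [pvScanS.eq_def]; simp [List.isPrefixOf]
        | cons d v =>
          by_cases hd : d = '\\'
          · subst hd; rw [pvScanS.eq_def]; simp [List.isPrefixOf]
          · rcases hesc : pvEsc.get? d with _ | e
            · rw [pvScanS.eq_def]
              simp only [if_neg h033, if_neg hd, hesc]
              simp [List.isPrefixOf]
            · obtain ⟨-, -, he⟩ := pvEsc_val_facts d e hesc hd
              rw [pvScanS.eq_def]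
              simp only [if_neg h033, if_neg hd, hesc]
              simp [List.isPrefixOf, he]
    · rw [scanS_cons_ne _ _ hc]
      by_cases hs : c = '/'
      · subst hs
        have := prefix_mono_bsbs _ (noBSBS t)
        simp [List.isPrefixOf, this]
      · simp [List.isPrefixOf, beq_eq_false_iff_ne.mpr (Ne.symm hs)]

-- the final sentinel replace turns the sentinel scan into B's scan
lemma lemB : ∀ (n : Nat) (l : List Char),
    l.length ≤ n → pvRepC ['%', '/', '\\', '\\', '/', '%'] ['\\'] (pvScanS l) = pvScan l := by
  intro n
  induction n with
  | zero =>
    intro l hl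
    have : l = [] := by cases l <;> simp_all
    subst this
    simp [pvScanS, pvRepC, pvScan]
  | succ n ih =>
    intro l hl
    cases l with
    | nil => simp [pvScanS, pvRepC, pvScan]
    | cons c t =>
      by_cases hc : c = '\\'
      · subst hc
        by_cases h033 : List.take 3 t = ['0', '3', '3']
        · have h2 : pvScanS ('\\' :: t) = '\x1B' :: pvScanS (List.drop 3 t) := by
            rw [pvScanS.eq_def]; simp [h033]
          have h3 : pvScan ('\\' :: t) = '\x1B' :: pvScan (List.drop 3 t) := by
            rw [pvScan.eq_def]; simp [h033]
          rw [h2, h3, rep6_push _ _ _ (by decide),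
              ih (List.drop 3 t) (by simp at hl ⊢; omega)]
        · cases t with
          | nil => simp [pvScanS, pvRepC, pvScan, List.isPrefixOf]
          | cons d v =>
            have hv : v.length ≤ n := by simp at hl; omega
            by_cases hd : d = '\\'
            · subst hd
              have h2 : pvScanS ('\\' :: '\\' :: v) =
                  '%' :: '/' :: '\\' :: '\\' :: '/' :: '%' :: pvScanS v := by
                rw [pvScanS.eq_def]; simp
              have h3 : pvScan ('\\' :: '\\' :: v) = '\\' :: pvScan v := by
                rw [pvScan.eq_def]
                simp [show pvEsc.get? '\\' = some '\\' from by decide]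
              rw [h2, h3, rep6_match, ih v hv]
              rfl
            · rcases hesc : pvEsc.get? d with _ | e
              · have k : d ≠ '0' := (pvEsc_none d hesc).2.2.2.2.2.2.2.2.2.1
                have h2 : pvScanS ('\\' :: d :: v) = '\\' :: pvScanS (d :: v) := by
                  rw [pvScanS.eq_def]; simp [hd, hesc]
                  exact fun h0 => absurd h0 k
                have h3 : pvScan ('\\' :: d :: v) = '\\' :: pvScan (d :: v) := by
                  rw [pvScan.eq_def]; simp [hesc]
                  exact fun h0 => absurd h0 k
                rw [h2, h3, rep6_push _ _ _ (by decide),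
                    ih (d :: v) (by simp at hl ⊢; omega)]
              · obtain ⟨-, he, -⟩ := pvEsc_val_facts d e hesc hd
                have hno : d = '0' → ¬ List.take 2 v = ['3', '3'] := by
                  intro h0 hh; exact h033 (by simp [h0, hh])
                have h2 : pvScanS ('\\' :: d :: v) = e :: pvScanS v := by
                  rw [pvScanS.eq_def]; simp [hd, hesc]
                  intro h0 hh; exact absurd hh (hno h0)
                have h3 : pvScan ('\\' :: d :: v) = e :: pvScan v := by
                  rw [pvScan.eq_def]; simp [hesc]
                  intro h0 hh; exact absurd hh (hno h0)
                rw [h2, h3, rep6_push _ _ _ he, ih v hv]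
      · have ht : t.length ≤ n := by simp at hl; omega
        have h2 := scanS_cons_ne c t hc
        have h3 : pvScan (c :: t) = c :: pvScan t := by
          rw [pvScan.eq_def]; simp [hc]
        by_cases hs : c = '%'
        · subst hs
          rw [h2, h3, rep6_pct _ _ (noSent t), ih t ht]
        · rw [h2, h3, rep6_push _ _ _ (beq_eq_false_iff_ne.mpr (Ne.symm hs)), ih t ht]

lemma strip_eq (l : List Char) : pvStripA l = pvStripB l := by
  induction l with
  | nil => rfl
  | cons c t ih => rw [pvStripA, pvStripB, ih]

-- ===== VERDICT (by name: the statement is the Claim_ definition above) =====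
theorem preprocess_string_spec : Claim_equal_preprocess_string := by
  intro s _
  unfold Spec_preprocess_string preprocess_string preprocess_string_alt
  dsimp only
  rw [← strip_eq]
  rw [replace_eq _ _ _ (by decide), replace_eq _ _ _ (by decide), replace_eq _ _ _ (by decide),
      replace_eq _ _ _ (by decide), replace_eq _ _ _ (by decide), replace_eq _ _ _ (by decide),
      replace_eq _ _ _ (by decide), replace_eq _ _ _ (by decide), replace_eq _ _ _ (by decide),
      replace_eq _ _ _ (by decide), replace_eq _ _ _ (by decide), replace_eq _ _ _ (by decide),
      replace_eq _ _ _ (by decide)]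
  rw [show ∀ l, pvRepC ['\\', '0'] ['\x00']
   (pvRepC ['\\', '0', '3', '3'] ['\x1B']
    (pvRepC ['\\', 'v'] ['\x0B']
     (pvRepC ['\\', 'a'] ['\x07']
      (pvRepC ['\\', 'f'] ['\x0C']
       (pvRepC ['\\', 't'] ['\t']
        (pvRepC ['\\', 'r'] ['\r']
         (pvRepC ['\\', 'b'] ['\x08']
          (pvRepC ['\\', 'n'] ['\n']
           (pvRepC ['\\', '\''] ['\'']
            (pvRepC ['\\', '"'] ['"']
             (pvRepC ['\\', '\\'] ['%', '/', '\\', '\\', '/', '%'] l))))))))))) = pvChain12 l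
    from fun _ => rfl]
  rw [lemA _ _ le_rfl, lemB _ _ le_rfl]
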